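-- pv_equiv track=rewrite | github.com/ganguagua/error_recognize | tools.py | format_white_space
-- ===== SOURCE A (Python) =====
-- import unicodedata
--
-- def format_white_space(content):
--     result = ""
--     last = 1
--     content = list(content)
--     for index in range(len(content)):
--         ch = content[index]
--         if ch in ("\n", "\t", "\r") or unicodedata.category(ch) in ("Zs", "Zp", "Zl"):
--             if last == 0 and index > 0 and is_punctuation(content[index-1])==False:
--                 ch = "# "
--             else:
--                 ch = ""
--             last = 1
--         else:
--             last = 0
--
--         result += ch
--     return result
--
-- def is_punctuation(char):
--   """Checks whether `chars` is a punctuation character."""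
--   cp = ord(char)
--   # We treat all non-letter/number ASCII as punctuation.
--   # Characters such as "^", "$", and "`" are not in the Unicode
--   # Punctuation class but we treat them as punctuation anyways, for
--   # consistency.
--   if ((cp >= 33 and cp <= 47) or (cp >= 58 and cp <= 64) or
--       (cp >= 91 and cp <= 96) or (cp >= 123 and cp <= 126)):
--     return True
--   cat = unicodedata.category(char)
--   if cat.startswith("P"):
--     return True
--   return False
-- ===== SOURCE B (Python) =====
-- import unicodedata
--
-- def is_punctuation(char):
--   cp = ord(char)
--   if ((cp >= 33 and cp <= 47) or (cp >= 58 and cp <= 64) or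
--       (cp >= 91 and cp <= 96) or (cp >= 123 and cp <= 126)):
--     return True
--   if unicodedata.category(char).startswith("P"):
--     return True
--   return False
--
-- def _is_ws(ch):
--     return ch in ("\n", "\t", "\r") or unicodedata.category(ch) in ("Zs", "Zp", "Zl")
--
-- def format_white_space(content):
--     out = []
--     prev = None  # last non-whitespace run seen so far
--     i = 0
--     n = len(content)
--     while i < n:
--         key = _is_ws(content[i])
--         j = i + 1
--         while j < n and _is_ws(content[j]) == key:
--             j += 1
--         run = content[i:j]
--         if key:
--             if prev is not None and not is_punctuation(prev[-1]):
--                 out.append("# ")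
--         else:
--             out.append(run)
--             prev = run
--         i = j
--     return "".join(out)
-- ===== Notes on version B (the rewrite author's own statement) =====
-- stated objective: alternative
-- what changed: Replaces A's per-character state machine (last flag plus index-1 lookback) with a run-based scan: the text is split into maximal whitespace/non-whitespace runs, non-whitespace runs are emitted verbatim and each whitespace run yields at most one marker decided from the last character of the previous non-whitespace run.
import Mathlib
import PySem

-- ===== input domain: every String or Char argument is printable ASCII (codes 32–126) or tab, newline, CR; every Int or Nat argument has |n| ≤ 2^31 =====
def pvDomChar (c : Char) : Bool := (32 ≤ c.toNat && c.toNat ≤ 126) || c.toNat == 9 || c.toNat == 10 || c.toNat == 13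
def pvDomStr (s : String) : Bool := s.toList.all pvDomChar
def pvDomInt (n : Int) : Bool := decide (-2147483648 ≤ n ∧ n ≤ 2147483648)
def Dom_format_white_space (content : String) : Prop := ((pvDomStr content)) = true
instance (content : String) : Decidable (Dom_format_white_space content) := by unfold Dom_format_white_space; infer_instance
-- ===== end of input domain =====

-- B replaces A's per-character state machine (last flag + index-1 lookback) by a run-based scan:
-- group the text into maximal whitespace/non-whitespace runs, emit non-ws runs verbatim and one
-- marker per ws run; objective: simpler decomposition (same return value, no speed claim).

-- `unicodedata.category ch ∈ ("Zs","Zp","Zl")` — on the domain (printable ASCII + tab/newline/CR)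
-- the only such character is ' '; exact on Dom.
def pyCatIsZ (c : Char) : Bool := c = ' '

-- `unicodedata.category(char).startswith("P")` — every ASCII character whose category starts with
-- "P" lies inside the four code ranges is_punctuation already tests; exact on Dom.
def pyCatStartsP (_c : Char) : Bool := false

-- transliteration of is_punctuation (shared: both Pythons contain this helper verbatim)
def is_punctuation (c : Char) : Bool :=
  let cp := c.toNat
  if (33 ≤ cp && cp ≤ 47) || (58 ≤ cp && cp ≤ 64) || (91 ≤ cp && cp ≤ 96) || (123 ≤ cp && cp ≤ 126) then
    true
  else if pyCatStartsP c then true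
  else false

-- ===== PORT A =====
-- the `for index in range(len(content))` loop, as recursion on the index; state = (result, last)
def loopA (cs : List Char) (index : Nat) (st : String × Int) : String × Int :=
  if _h : index < cs.length then
    let ch := cs.getD index ' '
    let st' :=
      if ch = '\n' || ch = '\t' || ch = '\r' || pyCatIsZ ch then
        ((st.1 ++ (if st.2 = 0 ∧ 0 < index ∧ is_punctuation (cs.getD (index - 1) ' ') = false then "# " else "")), (1 : Int))
      else
        (st.1 ++ String.singleton ch, (0 : Int))
    loopA cs (index + 1) st'
  else st
termination_by cs.length - index

def format_white_space (content : String) : String :=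
  (loopA content.toList 0 ("", 1)).1

-- ===== PORT B =====
def isWs (c : Char) : Bool := c = '\n' || c = '\t' || c = '\r' || pyCatIsZ c

-- the outer while loop of Source B: split into maximal runs of equal whitespace-ness
def runsB (l : List Char) : List (List Char) :=
  match l with
  | [] => []
  | c :: rest =>
      (c :: rest.takeWhile (fun d => isWs d == isWs c)) ::
        runsB (rest.dropWhile (fun d => isWs d == isWs c))
termination_by l.length
decreasing_by
  simpa using Nat.lt_succ_of_le (List.length_dropWhile_le _ _)

-- emission over the runs, carrying the last non-whitespace run (Source B's `prev`)
def emitB (prev : Option (List Char)) (rs : List (List Char)) : String :=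
  match rs with
  | [] => ""
  | g :: t =>
      if isWs (g.headD ' ') then
        (match prev with
         | some p => if is_punctuation (p.getLastD ' ') then "" else "# "
         | none => "") ++ emitB prev t
      else String.ofList g ++ emitB (some g) t

def format_white_space_alt (content : String) : String :=
  emitB none (runsB content.toList)

-- ===== PRECONDITION & SPEC =====
def Spec_format_white_space (content : String) (out : String) : Prop := out = format_white_space_alt content
instance (content : String) (out : String) : Decidable (Spec_format_white_space content out) := by unfold Spec_format_white_space; infer_instance

-- ===== CLAIM (what is proved, stated in full; the proofs are below) =====
def Claim_equal_format_white_space : Prop := ∀ (content : String), Dom_format_white_space content → Spec_format_white_space content (format_white_space content)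

-- ===== LEMMAS AND PROOFS =====

-- reference recursion both ports are reduced to: prev = the preceding character iff it was non-ws
def go (prev : Option Char) : List Char → String
  | [] => ""
  | c :: rest =>
      if isWs c then
        (match prev with
         | some p => if is_punctuation p then "" else "# "
         | none => "") ++ go none rest
      else String.singleton c ++ go (some c) rest

theorem ofList_cons (d : Char) (g : List Char) :
    String.ofList (d :: g) = String.singleton d ++ String.ofList g := by
  rw [← List.singleton_append, String.ofList_append]; congr 1

theorem loopA_eq_go_aux (cs : List Char) :
    ∀ (n index : Nat), cs.length - index ≤ n → ∀ (st : String × Int) (prev : Option Char),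
    ((st.2 = 1 ∧ prev = none) ∨
     (st.2 = 0 ∧ 0 < index ∧ prev = some (cs.getD (index - 1) ' '))) →
    (loopA cs index st).1 = st.1 ++ go prev (cs.drop index) := by
  intro n
  induction n with
  | zero =>
      intro index hn st prev _
      have hge : cs.length ≤ index := by omega
      rw [loopA]
      simp [Nat.not_lt_of_le hge, List.drop_of_length_le hge, go]
  | succ n ih =>
      intro index hn st prev hinv
      rw [loopA]
      by_cases h : index < cs.length
      · simp only [h, dif_pos]
        have hdrop : cs.drop index = cs[index] :: cs.drop (index + 1) :=
          List.drop_eq_getElem_cons h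
        have hch : cs.getD index ' ' = cs[index] := List.getD_eq_getElem cs ' ' h
        by_cases hws : (cs[index] = '\n' || cs[index] = '\t' || cs[index] = '\r' || pyCatIsZ cs[index]) = true
        · -- whitespace character
          simp only [hch, hws, if_pos]
          have hws' : isWs cs[index] = true := by simpa [isWs] using hws
          rcases hinv with ⟨h1, hp⟩ | ⟨h0, hpos, hp⟩
          · subst hp
            have hni : ¬ (st.2 = 0 ∧ 0 < index ∧ is_punctuation (cs.getD (index - 1) ' ') = false) := by
              rintro ⟨h2, -, -⟩; rw [h1] at h2; exact absurd h2 (by decide)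
            have hrec := ih (index + 1) (by omega) (st.1 ++ "", (1 : Int)) none (Or.inl ⟨rfl, rfl⟩)
            rw [if_neg hni, hrec, hdrop]
            simp [go, hws', String.append_assoc]
          · subst hp
            cases hb : is_punctuation (cs.getD (index - 1) ' ') with
            | true =>
                have hni : ¬ (st.2 = 0 ∧ 0 < index ∧ true = false) := by
                  rintro ⟨-, -, hf⟩; exact absurd hf (by decide)
                have hrec := ih (index + 1) (by omega) (st.1 ++ "", (1 : Int)) none (Or.inl ⟨rfl, rfl⟩)
                rw [if_neg hni, hrec, hdrop]
                rw [List.getD_eq_getElem?_getD] at hb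
                simp [go, hws', hb, String.append_assoc]
            | false =>
                have hrec := ih (index + 1) (by omega) (st.1 ++ "# ", (1 : Int)) none (Or.inl ⟨rfl, rfl⟩)
                rw [if_pos ⟨h0, hpos, rfl⟩, hrec, hdrop]
                rw [List.getD_eq_getElem?_getD] at hb
                simp [go, hws', hb, String.append_assoc]
        · -- non-whitespace character
          have hws' : isWs cs[index] = false := by
            cases hb : isWs cs[index] with
            | false => rfl
            | true => exact absurd (by simpa [isWs] using hb) hws
          simp only [hch]
          rw [if_neg hws]
          have hprev : cs.getD ((index + 1) - 1) ' ' = cs[index] := by simpa using hch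
          have hrec := ih (index + 1) (by omega)
            (st.1 ++ String.singleton cs[index], (0 : Int))
            (some cs[index])
            (Or.inr ⟨rfl, by omega, by rw [hprev]⟩)
          rw [hrec, hdrop]
          simp [go, hws', String.append_assoc]
          rw [← String.append_assoc]
          congr 1
      · simp only [h, dif_neg, not_false_iff]
        have hge : cs.length ≤ index := by omega
        simp [List.drop_of_length_le hge, go]

theorem loopA_eq_go (cs : List Char) :
    (loopA cs 0 ("", 1)).1 = go none cs := by
  have := loopA_eq_go_aux cs cs.length 0 (by omega) ("", 1) none (Or.inl ⟨rfl, rfl⟩)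
  simpa using this

theorem go_ws_skip (g t : List Char) (h : ∀ d ∈ g, isWs d = true) :
    go none (g ++ t) = go none t := by
  induction g with
  | nil => rfl
  | cons d g ih =>
      simp only [List.cons_append, go, h d (by simp)]
      simp only [ih (fun d hd => h d (by simp [hd]))]
      rfl

theorem go_nonws_run (g t : List Char) (p : Char) (h : ∀ d ∈ g, isWs d = false) :
    go (some p) (g ++ t) = String.ofList g ++ go (some ((p :: g).getLastD ' ')) t := by
  induction g generalizing p with
  | nil => simp [String.ofList]; rfl
  | cons d g ih =>
      simp only [List.cons_append, go, h d (by simp)]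
      rw [ih d (fun d hd => h d (by simp [hd])), ofList_cons]
      simp [String.append_assoc]

theorem emitB_eq_go (l : List Char) :
    ∀ (prevR : Option (List Char)) (prevC : Option Char),
    ((prevR = none ∧ prevC = none) ∨
     (∃ p, prevR = some p ∧ p ≠ [] ∧ prevC = some (p.getLastD ' ')) ∨
     (prevC = none ∧ ∀ c, l.head? = some c → isWs c = false)) →
    emitB prevR (runsB l) = go prevC l := by
  induction l using runsB.induct with
  | case1 => intro prevR prevC _; simp [runsB, emitB, go]
  | case2 c rest ih =>
      intro prevR prevC hinv
      rw [runsB]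
      have htk : ∀ d ∈ rest.takeWhile (fun d => isWs d == isWs c), isWs d = isWs c := by
        intro d hd
        simpa using List.mem_takeWhile_imp hd
      have hdw : ∀ x, (rest.dropWhile (fun d => isWs d == isWs c)).head? = some x → (isWs x == isWs c) = false := by
        intro x hx
        have := List.head?_dropWhile_not (fun d => isWs d == isWs c) rest
        simpa [hx] using this
      have hsplit : c :: rest = c :: (rest.takeWhile (fun d => isWs d == isWs c) ++ rest.dropWhile (fun d => isWs d == isWs c)) := by
        rw [List.takeWhile_append_dropWhile]
      by_cases hws : isWs c = true
      · -- whitespace run: one marker for the whole run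
        have hrec := ih prevR none (Or.inr (Or.inr ⟨rfl, fun x hx => by
          have := hdw x hx; simpa [hws] using this⟩))
        simp only [emitB, List.headD_cons]
        rw [if_pos hws, hrec]
        conv_rhs => rw [hsplit]
        simp only [go]
        rw [if_pos hws, go_ws_skip _ _ (fun d hd => by rw [htk d hd, hws])]
        rcases hinv with ⟨hR, hC⟩ | ⟨p, hR, hne, hC⟩ | ⟨hC, hhead⟩
        · subst hR; subst hC; rfl
        · subst hR; subst hC; rfl
        · exact absurd (hhead c rfl) (by simp [hws])
      · -- non-whitespace run: emit it verbatim, it becomes the new prev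
        have hws' : isWs c = false := by
          cases hb : isWs c with
          | false => rfl
          | true => exact absurd hb hws
        have hrec := ih (some (c :: rest.takeWhile (fun d => isWs d == isWs c)))
          (some ((c :: rest.takeWhile (fun d => isWs d == isWs c)).getLastD ' '))
          (Or.inr (Or.inl ⟨_, rfl, by simp, rfl⟩))
        simp only [emitB, List.headD_cons]
        rw [if_neg (by simp [hws']), hrec]
        conv_rhs => rw [hsplit]
        simp only [go]
        rw [if_neg (by simp [hws']), go_nonws_run _ _ c (fun d hd => by rw [htk d hd, hws']), ofList_cons]
        simp [String.append_assoc]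

-- ===== VERDICT (by name: the statement is the Claim_ definition above) =====
theorem format_white_space_spec : Claim_equal_format_white_space := by
  intro content _
  unfold Spec_format_white_space format_white_space format_white_space_alt
  rw [loopA_eq_go, emitB_eq_go content.toList none none (Or.inl ⟨rfl, rfl⟩)]
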